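-- pv_equiv track=rewrite | github.com/uedaLabR/nanoDoc2 | signalalign/OutputUtils.py | toCigar
-- ===== SOURCE A (Python) =====
-- def toCigar(traceback_path,seqlen):
--
--     nprev = -1
--     mprev = -1
--     cnttotal = 0
--     cigigarlist = []
--     countdel = 0
--     countmatchmismach = 0
--     init = True
--     for n, m in traceback_path:
--
--         if init:
--             if n>0:
--                 cigigarlist.append(str(n) + "N")
--             init = False
--
--         if m == mprev:  # delation
--             countdel += 1
--             if (countmatchmismach > 0):
--
--                 if (cnttotal + countmatchmismach) > seqlen:
--                     mm = seqlen - cnttotal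
--                 else:
--                     mm = countmatchmismach
--                 cnttotal += mm
--                 cigigarlist.append(str(mm) + "M")
--
--             countmatchmismach = 0
--
--         else:  # match or mismatch
--             countmatchmismach += 1
--             if (countdel > 0):
--                 cigigarlist.append(str(countdel) + "D")
--             countdel = 0
--         mprev = m
--
--     if (countmatchmismach > 0):
--         if (cnttotal + countmatchmismach) > seqlen:
--             mm = seqlen - cnttotal
--         else:
--             mm = countmatchmismach
--         cnttotal += mm
--         cigigarlist.append(str(mm) + "M")
--     if (countdel > 0):
--         cigigarlist.append(str(countdel) + "D")
--     cigarstring = "".join(cigigarlist)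
--
--     return cigarstring
-- ===== SOURCE B (Python) =====
-- def toCigar(traceback_path, seqlen):
--     # Phase 1: one pass labelling each step as deletion (m unchanged) or match.
--     labels = []
--     mprev = -1
--     for _, m in traceback_path:
--         labels.append(m == mprev)  # True = deletion
--         mprev = m
--     # Phase 2: run-length encode the labels.
--     runs = []
--     cur = None
--     cnt = 0
--     for lab in labels:
--         if cur is not None and lab == cur:
--             cnt += 1
--         else:
--             if cur is not None:
--                 runs.append((cur, cnt))
--             cur, cnt = lab, 1
--     if cur is not None:
--         runs.append((cur, cnt))
--     # Phase 3: emit pieces (leading N from first tuple, then the runs).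
--     pieces = []
--     if traceback_path and traceback_path[0][0] > 0:
--         pieces.append(str(traceback_path[0][0]) + "N")
--     cnttotal = 0
--     for isdel, runlen in runs:
--         if isdel:
--             pieces.append(str(runlen) + "D")
--         else:
--             mm = seqlen - cnttotal if cnttotal + runlen > seqlen else runlen
--             pieces.append(str(mm) + "M")
--             cnttotal += mm
--     return "".join(pieces)
-- ===== Notes on version B (the rewrite author's own statement) =====
-- stated objective: alternative
-- what changed: Replaces A's single loop with five interacting state variables (pending D/M counts flushed at transitions) by three independent passes: label each step as deletion/match, run-length encode the labels, then emit the CIGAR pieces per run (threading cnttotal with A's exact seqlen cap).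
import Mathlib
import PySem

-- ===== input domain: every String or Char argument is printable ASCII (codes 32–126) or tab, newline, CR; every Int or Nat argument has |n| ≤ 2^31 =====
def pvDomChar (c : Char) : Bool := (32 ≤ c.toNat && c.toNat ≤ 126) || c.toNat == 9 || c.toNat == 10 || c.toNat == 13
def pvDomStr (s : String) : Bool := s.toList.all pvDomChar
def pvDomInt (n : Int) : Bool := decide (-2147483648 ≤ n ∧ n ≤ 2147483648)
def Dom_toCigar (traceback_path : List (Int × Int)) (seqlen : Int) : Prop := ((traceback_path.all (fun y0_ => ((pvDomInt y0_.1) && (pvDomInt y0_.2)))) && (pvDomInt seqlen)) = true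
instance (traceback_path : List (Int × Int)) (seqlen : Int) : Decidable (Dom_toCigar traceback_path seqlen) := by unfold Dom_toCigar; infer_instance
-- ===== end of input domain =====

-- B re-implements toCigar as three plain passes (label, run-length encode, emit) instead of A's single loop with five state variables; objective: alternative decomposition, same cost.


-- ===== PORT A =====
-- A's single loop; state = (mprev, cnttotal, acc, countdel, countmatchmismach, init); the final flushes are the [] case.
def toCigarLoopA (seqlen : Int) : List (Int × Int) → Int → Int → List String → Int → Int → Bool → String
  | [], _, cnttotal, acc, cd, cm, _ =>
      if cm > 0 then
        let mm := if cnttotal + cm > seqlen then seqlen - cnttotal else cm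
        if cd > 0 then String.join (acc ++ [PySem.Int.toStr mm ++ "M"] ++ [PySem.Int.toStr cd ++ "D"])
        else String.join (acc ++ [PySem.Int.toStr mm ++ "M"])
      else
        if cd > 0 then String.join (acc ++ [PySem.Int.toStr cd ++ "D"])
        else String.join acc
  | (n, m) :: t, mprev, cnttotal, acc, cd, cm, init =>
      let acc := if init && decide (n > 0) then acc ++ [PySem.Int.toStr n ++ "N"] else acc
      if m = mprev then
        -- deletion: countdel += 1, flush pending match run
        if cm > 0 then
          let mm := if cnttotal + cm > seqlen then seqlen - cnttotal else cm
          toCigarLoopA seqlen t m (cnttotal + mm) (acc ++ [PySem.Int.toStr mm ++ "M"]) (cd + 1) 0 false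
        else
          toCigarLoopA seqlen t m cnttotal acc (cd + 1) 0 false
      else
        -- match/mismatch: countmatchmismach += 1, flush pending deletion run
        if cd > 0 then
          toCigarLoopA seqlen t m cnttotal (acc ++ [PySem.Int.toStr cd ++ "D"]) 0 (cm + 1) false
        else
          toCigarLoopA seqlen t m cnttotal acc 0 (cm + 1) false

def toCigar (traceback_path : List (Int × Int)) (seqlen : Int) : String :=
  toCigarLoopA seqlen traceback_path (-1) 0 [] 0 0 true

-- ===== PORT B =====
-- Phase 1: label each step (true = deletion, i.e. m unchanged from previous).
def mkLabels : List (Int × Int) → Int → List Bool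
  | [], _ => []
  | (_, m) :: t, mprev => (m = mprev) :: mkLabels t m

-- Phase 2: run-length encoding, carrying the current key and count.
def rleAux (k : Bool) (c : Int) : List Bool → List (Bool × Int)
  | [] => [(k, c)]
  | x :: t => if x = k then rleAux k (c + 1) t else (k, c) :: rleAux x 1 t

def rle : List Bool → List (Bool × Int)
  | [] => []
  | x :: t => rleAux x 1 t

-- Phase 3: emit the piece for each run, threading cnttotal through the M runs.
def emitRuns (seqlen : Int) : Int → List (Bool × Int) → List String
  | _, [] => []
  | cnt, (true, l) :: rest => (PySem.Int.toStr l ++ "D") :: emitRuns seqlen cnt rest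
  | cnt, (false, l) :: rest =>
      let mm := if cnt + l > seqlen then seqlen - cnt else l
      (PySem.Int.toStr mm ++ "M") :: emitRuns seqlen (cnt + mm) rest

def toCigar_alt (traceback_path : List (Int × Int)) (seqlen : Int) : String :=
  String.join
    ((match traceback_path with
      | (n, _) :: _ => if n > 0 then [PySem.Int.toStr n ++ "N"] else []
      | [] => []) ++
     emitRuns seqlen 0 (rle (mkLabels traceback_path (-1))))

-- ===== PRECONDITION & SPEC =====
def Spec_toCigar (traceback_path : List (Int × Int)) (seqlen : Int) (out : String) : Prop := out = toCigar_alt traceback_path seqlen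
instance (traceback_path : List (Int × Int)) (seqlen : Int) (out : String) : Decidable (Spec_toCigar traceback_path seqlen out) := by unfold Spec_toCigar; infer_instance

-- ===== CLAIM (what is proved, stated in full; the proofs are below) =====
def Claim_equal_toCigar : Prop := ∀ (traceback_path : List (Int × Int)) (seqlen : Int), Dom_toCigar traceback_path seqlen → Spec_toCigar traceback_path seqlen (toCigar traceback_path seqlen)

-- ===== LEMMAS AND PROOFS =====

-- Merge a pending run (key k, count c) into the front of a run list.
def mergeRun (k : Bool) (c : Int) : List (Bool × Int) → List (Bool × Int)
  | [] => [(k, c)]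
  | (k', l) :: rest => if k' = k then (k, c + l) :: rest else (k, c) :: (k', l) :: rest

def mergePending (cd cm : Int) (runs : List (Bool × Int)) : List (Bool × Int) :=
  if cm > 0 then mergeRun false cm runs
  else if cd > 0 then mergeRun true cd runs
  else runs

theorem mergeRun_same (k : Bool) (c d : Int) (R : List (Bool × Int)) :
    mergeRun k c (mergeRun k d R) = mergeRun k (c + d) R := by
  cases R with
  | nil => simp [mergeRun]
  | cons hd tl =>
      obtain ⟨a, l⟩ := hd
      by_cases h : a = k <;> simp [mergeRun, h] <;> try ring_nf

theorem mergeRun_ne (k k' : Bool) (c d : Int) (R : List (Bool × Int)) (h : k ≠ k') :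
    mergeRun k c (mergeRun k' d R) = (k, c) :: mergeRun k' d R := by
  cases R with
  | nil => simp [mergeRun, Ne.symm h]
  | cons hd tl =>
      obtain ⟨a, l⟩ := hd
      by_cases h2 : a = k' <;> simp [mergeRun, h2, Ne.symm h]

theorem rleAux_eq (L : List Bool) : ∀ (k : Bool) (c : Int), rleAux k c L = mergeRun k c (rle L) := by
  induction L with
  | nil => intro k c; simp [rleAux, rle, mergeRun]
  | cons x t ih =>
      intro k c
      by_cases h : x = k
      · subst h
        rw [show rleAux x c (x :: t) = rleAux x (c + 1) t from by simp [rleAux],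
            show rle (x :: t) = rleAux x 1 t from rfl,
            ih, ih, mergeRun_same]
      · rw [show rleAux k c (x :: t) = (k, c) :: rleAux x 1 t from by simp [rleAux, h],
            show rle (x :: t) = rleAux x 1 t from rfl,
            ih, mergeRun_ne k x c 1 (rle t) (Ne.symm h)]

theorem rle_cons (x : Bool) (t : List Bool) : rle (x :: t) = mergeRun x 1 (rle t) := by
  rw [show rle (x :: t) = rleAux x 1 t from rfl, rleAux_eq]

-- Main loop invariant: A's loop (past the init step) produces B's emitted runs with the
-- pending counters merged into the first run.
theorem loopA_eq (seqlen : Int) (t : List (Int × Int)) :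
    ∀ (mprev cnt : Int) (acc : List String) (cd cm : Int),
    0 ≤ cd → 0 ≤ cm → (cd = 0 ∨ cm = 0) →
    toCigarLoopA seqlen t mprev cnt acc cd cm false =
      String.join (acc ++ emitRuns seqlen cnt (mergePending cd cm (rle (mkLabels t mprev)))) := by
  induction t with
  | nil =>
      intro mprev cnt acc cd cm h0d h0m h
      by_cases hm : cm > 0
      · have hd : ¬ cd > 0 := by rcases h with h | h <;> omega
        simp [toCigarLoopA, mkLabels, rle, mergePending, hm, hd, mergeRun, emitRuns]
      · by_cases hd : cd > 0 <;>
          simp [toCigarLoopA, mkLabels, rle, mergePending, hm, hd, mergeRun, emitRuns]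
  | cons hd tl ih =>
      obtain ⟨n, m⟩ := hd
      intro mprev cnt acc cd cm h0d h0m h
      by_cases he : m = mprev
      · subst he
        rw [show mkLabels ((n, m) :: tl) m = true :: mkLabels tl m from by simp [mkLabels],
            rle_cons]
        by_cases hm : cm > 0
        · have hcd : cd = 0 := by rcases h with h | h <;> omega
          subst hcd
          rw [show toCigarLoopA seqlen ((n, m) :: tl) m cnt acc 0 cm false =
                toCigarLoopA seqlen tl m
                  (cnt + if cnt + cm > seqlen then seqlen - cnt else cm)
                  (acc ++ [PySem.Int.toStr (if cnt + cm > seqlen then seqlen - cnt else cm) ++ "M"])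
                  1 0 false from by simp [toCigarLoopA, hm]]
          rw [ih m _ _ 1 0 (by omega) le_rfl (Or.inr rfl)]
          simp only [mergePending, if_pos hm, if_neg (by omega : ¬(0:Int) > 0),
            if_pos (by omega : (1:Int) > 0),
            mergeRun_ne false true cm 1 (rle (mkLabels tl m)) (by simp), emitRuns]
          simp [List.append_assoc]
        · have hcm : cm = 0 := by omega
          subst hcm
          rw [show toCigarLoopA seqlen ((n, m) :: tl) m cnt acc cd 0 false =
                toCigarLoopA seqlen tl m cnt acc (cd + 1) 0 false from by
              simp [toCigarLoopA]]
          rw [ih m _ _ (cd + 1) 0 (by omega) le_rfl (Or.inr rfl)]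
          by_cases hcd : cd > 0
          · simp only [mergePending, if_neg (by omega : ¬(0:Int) > 0), if_pos hcd,
              if_pos (by omega : cd + 1 > 0),
              mergeRun_same true cd 1 (rle (mkLabels tl m))]
          · have : cd = 0 := by omega
            subst this
            simp [mergePending]
      · rw [show mkLabels ((n, m) :: tl) mprev = false :: mkLabels tl m from by
              simp [mkLabels, he],
            rle_cons]
        by_cases hcd : cd > 0
        · have hcm : cm = 0 := by rcases h with h | h <;> omega
          subst hcm
          rw [show toCigarLoopA seqlen ((n, m) :: tl) mprev cnt acc cd 0 false =
                toCigarLoopA seqlen tl m cnt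
                  (acc ++ [PySem.Int.toStr cd ++ "D"]) 0 1 false from by
              simp [toCigarLoopA, he, hcd]]
          rw [ih m _ _ 0 1 le_rfl (by omega) (Or.inl rfl)]
          simp only [mergePending, if_neg (by omega : ¬(0:Int) > 0), if_pos hcd,
            if_pos (by omega : (1:Int) > 0),
            mergeRun_ne true false cd 1 (rle (mkLabels tl m)) (by simp), emitRuns]
          simp [List.append_assoc]
        · have hcd0 : cd = 0 := by omega
          subst hcd0
          rw [show toCigarLoopA seqlen ((n, m) :: tl) mprev cnt acc 0 cm false =
                toCigarLoopA seqlen tl m cnt acc 0 (cm + 1) false from by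
              simp [toCigarLoopA, he]]
          rw [ih m _ _ 0 (cm + 1) le_rfl (by omega) (Or.inl rfl)]
          by_cases hcm : cm > 0
          · simp only [mergePending, if_pos hcm, if_pos (by omega : cm + 1 > 0),
              mergeRun_same false cm 1 (rle (mkLabels tl m))]
          · have : cm = 0 := by omega
            subst this
            simp [mergePending]

-- ===== VERDICT (by name: the statement is the Claim_ definition above) =====
theorem toCigar_spec : Claim_equal_toCigar := by
  intro path seqlen _
  unfold Spec_toCigar toCigar toCigar_alt
  cases path with
  | nil => simp [toCigarLoopA, mkLabels, rle, emitRuns]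
  | cons hd tl =>
      obtain ⟨n, m⟩ := hd
      rw [show mkLabels ((n, m) :: tl) (-1) = (m = (-1 : Int) : Bool) :: mkLabels tl m from by
            simp [mkLabels], rle_cons]
      by_cases he : m = (-1 : Int)
      · rw [show toCigarLoopA seqlen ((n, m) :: tl) (-1) 0 [] 0 0 true =
              toCigarLoopA seqlen tl m 0
                (if n > 0 then [PySem.Int.toStr n ++ "N"] else []) 1 0 false from by
            by_cases hn : n > 0 <;> simp [toCigarLoopA, he, hn]]
        rw [loopA_eq seqlen tl m 0 _ 1 0 (by omega) le_rfl (Or.inr rfl)]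
        simp [he, mergePending]
      · rw [show toCigarLoopA seqlen ((n, m) :: tl) (-1) 0 [] 0 0 true =
              toCigarLoopA seqlen tl m 0
                (if n > 0 then [PySem.Int.toStr n ++ "N"] else []) 0 1 false from by
            by_cases hn : n > 0 <;> simp [toCigarLoopA, he, hn]]
        rw [loopA_eq seqlen tl m 0 _ 0 1 le_rfl (by omega) (Or.inl rfl)]
        simp [he, mergePending]
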